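-- pv_equiv track=rewrite | github.com/SpedrazaDev/Proyectos-U.1 | Matriz.py | estado_matriz
-- ===== SOURCE A (Python) =====
-- def estado_matriz(filas, columnas, posInfectadas, posBloqueadas):
--     estado_Matriz=[]
--
--     for y in range(filas):
--         fila=[]
--         for x in range(columnas):
--             if (x, y) in posInfectadas:
--                 fila.append(1)  # Virus
--             elif (x, y) in posBloqueadas:
--                 fila.append(2)  # Barrera
--             else:
--                 fila.append(0)  # Libre
--         estado_Matriz.append(fila)
--     return estado_Matriz
-- ===== SOURCE B (Python) =====
-- def estado_matriz(filas, columnas, posInfectadas, posBloqueadas):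
--     estado = [[0] * columnas for _ in range(filas)]
--     for x, y in posBloqueadas:
--         if 0 <= x < columnas and 0 <= y < filas:
--             estado[y][x] = 2
--     for x, y in posInfectadas:
--         if 0 <= x < columnas and 0 <= y < filas:
--             estado[y][x] = 1
--     return estado
-- ===== Notes on version B (the rewrite author's own statement) =====
-- stated objective: faster
-- what changed: Instead of testing every grid cell for membership in both position lists, B allocates an all-zero grid once and writes 2 at each in-bounds blocked position, then 1 at each in-bounds infected position (infected last, matching A's priority), removing the per-cell list scans.
import Mathlib
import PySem

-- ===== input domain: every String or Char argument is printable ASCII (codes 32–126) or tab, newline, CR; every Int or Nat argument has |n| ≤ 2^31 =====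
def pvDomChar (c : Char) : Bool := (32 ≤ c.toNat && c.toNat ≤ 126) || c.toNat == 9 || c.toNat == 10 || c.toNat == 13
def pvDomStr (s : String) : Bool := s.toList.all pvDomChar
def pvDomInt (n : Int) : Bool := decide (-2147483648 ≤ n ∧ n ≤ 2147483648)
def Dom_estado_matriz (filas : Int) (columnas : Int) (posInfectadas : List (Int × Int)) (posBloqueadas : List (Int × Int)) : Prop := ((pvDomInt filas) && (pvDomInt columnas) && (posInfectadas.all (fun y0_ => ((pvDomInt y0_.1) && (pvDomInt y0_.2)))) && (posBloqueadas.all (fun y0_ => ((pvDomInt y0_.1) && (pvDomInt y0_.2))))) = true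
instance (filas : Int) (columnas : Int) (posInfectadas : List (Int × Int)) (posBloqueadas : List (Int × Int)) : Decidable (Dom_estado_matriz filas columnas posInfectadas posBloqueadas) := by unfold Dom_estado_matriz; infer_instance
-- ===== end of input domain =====

-- B replaces A's per-cell membership scans by one zero-filled grid plus a single write pass over
-- each position list (blocked first, infected last, matching A's priority): faster, same results.

-- ===== PORT A =====
-- literal transliteration of A: outer loop over range(filas) appending rows,
-- inner loop over range(columnas) appending 1/2/0 by list membership
def estado_matriz (filas : Int) (columnas : Int) (posInfectadas : List (Int × Int)) (posBloqueadas : List (Int × Int)) : List (List Int) :=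
  (PySem.List.pyRange 0 filas 1).foldl (fun estado_Matriz y =>
    estado_Matriz ++ [(PySem.List.pyRange 0 columnas 1).foldl (fun fila x =>
      fila ++ [if posInfectadas.contains (x, y) then (1 : Int)
               else if posBloqueadas.contains (x, y) then 2 else 0]) []]) []

-- ===== PORT B =====
-- 'if 0 <= x < columnas and 0 <= y < filas: estado[y][x] = v' of Source B
def writeCell (filas : Int) (columnas : Int) (v : Int) (g : List (List Int)) (p : Int × Int) : List (List Int) :=
  if 0 ≤ p.1 ∧ p.1 < columnas ∧ 0 ≤ p.2 ∧ p.2 < filas then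
    g.modify p.2.toNat (fun row => row.set p.1.toNat v)
  else g

def estado_matriz_alt (filas : Int) (columnas : Int) (posInfectadas : List (Int × Int)) (posBloqueadas : List (Int × Int)) : List (List Int) :=
  posInfectadas.foldl (writeCell filas columnas 1)
    (posBloqueadas.foldl (writeCell filas columnas 2)
      ((List.range filas.toNat).map (fun _ => List.replicate columnas.toNat (0 : Int))))

-- ===== PRECONDITION & SPEC =====
def Spec_estado_matriz (filas : Int) (columnas : Int) (posInfectadas : List (Int × Int)) (posBloqueadas : List (Int × Int)) (out : List (List Int)) : Prop := out = estado_matriz_alt filas columnas posInfectadas posBloqueadas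
instance (filas : Int) (columnas : Int) (posInfectadas : List (Int × Int)) (posBloqueadas : List (Int × Int)) (out : List (List Int)) : Decidable (Spec_estado_matriz filas columnas posInfectadas posBloqueadas out) := by unfold Spec_estado_matriz; infer_instance

-- ===== CLAIM (what is proved, stated in full; the proofs are below) =====
def Claim_equal_estado_matriz : Prop := ∀ (filas : Int) (columnas : Int) (posInfectadas : List (Int × Int)) (posBloqueadas : List (Int × Int)), Dom_estado_matriz filas columnas posInfectadas posBloqueadas → Spec_estado_matriz filas columnas posInfectadas posBloqueadas (estado_matriz filas columnas posInfectadas posBloqueadas)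

-- ===== LEMMAS AND PROOFS =====

-- the loop invariant: the grid has filas rows of columnas cells each
def GridShape (filas columnas : Int) (g : List (List Int)) : Prop :=
  g.length = filas.toNat ∧ ∀ (j : Nat) (r : List Int), g[j]? = some r → r.length = columnas.toNat

theorem gridShape_writeCell (filas columnas v : Int) (g : List (List Int)) (p : Int × Int)
    (h : GridShape filas columnas g) : GridShape filas columnas (writeCell filas columnas v g p) := by
  obtain ⟨h1, h2⟩ := h
  unfold writeCell
  split
  · refine ⟨by simpa using h1, ?_⟩
    intro j r hr
    by_cases hj : p.2.toNat = j
    · subst hj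
      rw [List.getElem?_modify_eq] at hr
      rcases hg : g[p.2.toNat]? with _ | r0
      · simp [hg] at hr
      · rw [hg] at hr
        obtain rfl : r0.set p.1.toNat v = r := by simpa using hr
        simpa using h2 _ _ hg
    · rw [List.getElem?_modify_ne _ _ hj] at hr
      exact h2 _ _ hr
  · exact ⟨h1, h2⟩

theorem gridShape_foldl (filas columnas v : Int) (ps : List (Int × Int)) (g : List (List Int))
    (h : GridShape filas columnas g) :
    GridShape filas columnas (ps.foldl (writeCell filas columnas v) g) := by
  induction ps generalizing g with
  | nil => exact h
  | cons p ps ih => exact ih _ (gridShape_writeCell _ _ _ _ _ h)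

-- value of one cell after a single conditional write
theorem cell_writeCell (filas columnas v : Int) (g : List (List Int)) (p : Int × Int)
    (h : GridShape filas columnas g) (y x : Nat) (hy : y < filas.toNat) (hx : x < columnas.toNat) :
    ((writeCell filas columnas v g p)[y]?.bind fun r => r[x]?) =
      if p = ((x : Int), (y : Int)) then some v else (g[y]?.bind fun r => r[x]?) := by
  obtain ⟨h1, h2⟩ := h
  unfold writeCell
  by_cases hp : p = ((x : Int), (y : Int))
  · subst hp
    have hc : (0:Int) ≤ (x:Int) ∧ (x:Int) < columnas ∧ (0:Int) ≤ (y:Int) ∧ (y:Int) < filas := by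
      refine ⟨by omega, by omega, by omega, by omega⟩
    rw [if_pos hc, if_pos rfl]
    simp only [Int.toNat_natCast]
    rw [List.getElem?_modify_eq]
    have hyg : y < g.length := by omega
    rw [List.getElem?_eq_getElem hyg]
    have hlen : (g[y]).length = columnas.toNat := h2 y _ (List.getElem?_eq_getElem hyg)
    simp [hlen, hx]
  · rw [if_neg hp]
    split
    · rename_i hb
      by_cases hj : p.2.toNat = y
      · -- same row, different column
        rw [← hj, List.getElem?_modify_eq]
        have hx1 : p.1.toNat ≠ x := by
          intro hc
          apply hp
          have : p.1 = (x : Int) := by omega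
          have : p.2 = (y : Int) := by omega
          exact Prod.ext ‹p.1 = (x:Int)› ‹p.2 = (y:Int)›
        rcases hg : g[p.2.toNat]? with _ | r0
        · simp
        · simp [hx1]
      · rw [List.getElem?_modify_ne _ _ hj]
    · rfl

-- value of one cell after the whole write pass
theorem cell_foldl_writeCell (filas columnas v : Int) (ps : List (Int × Int)) (g : List (List Int))
    (h : GridShape filas columnas g) (y x : Nat) (hy : y < filas.toNat) (hx : x < columnas.toNat) :
    ((ps.foldl (writeCell filas columnas v) g)[y]?.bind fun r => r[x]?) =
      if ps.contains ((x : Int), (y : Int)) then some v else (g[y]?.bind fun r => r[x]?) := by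
  induction ps generalizing g with
  | nil => simp
  | cons p ps ih =>
    rw [List.foldl_cons, ih _ (gridShape_writeCell _ _ _ _ _ h),
      cell_writeCell _ _ _ _ _ h _ _ hy hx]
    by_cases hp : p = ((x : Int), (y : Int))
    · simp [hp]
    · have hp' : ¬(((x : Int), (y : Int)) = p) := fun hq => hp hq.symm
      by_cases hmem : ((x : Int), (y : Int)) ∈ ps
      · simp [hmem]
      · simp [hmem, hp', hp]

-- A's result as a nested map
theorem estado_matriz_eq_map (filas columnas : Int) (posInfectadas posBloqueadas : List (Int × Int)) :
    estado_matriz filas columnas posInfectadas posBloqueadas =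
      (PySem.List.pyRange 0 filas 1).map (fun y =>
        (PySem.List.pyRange 0 columnas 1).map (fun x =>
          if posInfectadas.contains (x, y) then (1 : Int)
          else if posBloqueadas.contains (x, y) then 2 else 0)) := by
  unfold estado_matriz
  simp only [PySem.List.foldl_append_singleton_eq_map, List.nil_append]

-- ===== VERDICT (by name: the statement is the Claim_ definition above) =====
theorem estado_matriz_spec : Claim_equal_estado_matriz := by
  intro filas columnas posInfectadas posBloqueadas _
  unfold Spec_estado_matriz estado_matriz_alt
  have hshape0 : GridShape filas columnas
      ((List.range filas.toNat).map (fun _ => List.replicate columnas.toNat (0 : Int))) := by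
    constructor
    · simp
    · intro j r hr
      rw [List.getElem?_map] at hr
      rcases hg : (List.range filas.toNat)[j]? with _ | k
      · rw [hg] at hr; cases hr
      · rw [hg] at hr
        obtain rfl : List.replicate columnas.toNat (0:Int) = r := by simpa using hr
        simp
  have hshape1 := gridShape_foldl filas columnas 2 posBloqueadas _ hshape0
  have hshape2 := gridShape_foldl filas columnas 1 posInfectadas _ hshape1
  rw [estado_matriz_eq_map]
  apply List.ext_getElem?
  intro i
  by_cases hi : i < filas.toNat
  · rw [List.getElem?_map, PySem.List.getElem?_pyRange_one,
      if_pos (show i < (filas - 0).toNat by omega)]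
    have hBi : i < (posInfectadas.foldl (writeCell filas columnas 1)
        (posBloqueadas.foldl (writeCell filas columnas 2)
          ((List.range filas.toNat).map (fun _ => List.replicate columnas.toNat 0)))).length := by
      rw [hshape2.1]; exact hi
    rw [List.getElem?_eq_getElem hBi]
    simp only [Option.map_some, zero_add]
    congr 1
    apply List.ext_getElem?
    intro j
    by_cases hj : j < columnas.toNat
    · rw [List.getElem?_map, PySem.List.getElem?_pyRange_one,
        if_pos (show j < (columnas - 0).toNat by omega)]
      have hcell := cell_foldl_writeCell filas columnas 1 posInfectadas _ hshape1 i j hi hj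
      rw [List.getElem?_eq_getElem hBi] at hcell
      simp only [Option.bind_some] at hcell
      rw [hcell]
      have hcell2 := cell_foldl_writeCell filas columnas 2 posBloqueadas _ hshape0 i j hi hj
      rw [hcell2]
      have hcell0 : (((List.range filas.toNat).map (fun _ => List.replicate columnas.toNat (0:Int)))[i]?.bind
          fun r => r[j]?) = some 0 := by
        simp [hi, hj]
      rw [hcell0]
      simp only [Option.map_some, zero_add]
      by_cases h1 : ((j:Int), (i:Int)) ∈ posInfectadas <;>
        by_cases h2 : ((j:Int), (i:Int)) ∈ posBloqueadas <;> simp [h1, h2]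
    · have hr : ((posInfectadas.foldl (writeCell filas columnas 1)
          (posBloqueadas.foldl (writeCell filas columnas 2)
            ((List.range filas.toNat).map (fun _ => List.replicate columnas.toNat 0))))[i]).length
          = columnas.toNat := hshape2.2 i _ (List.getElem?_eq_getElem hBi)
      rw [List.getElem?_eq_none, List.getElem?_eq_none]
      · omega
      · simp [PySem.List.length_pyRange_one]; omega
  · rw [List.getElem?_eq_none, List.getElem?_eq_none]
    · rw [hshape2.1]; omega
    · simp [PySem.List.length_pyRange_one]; omega
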